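-- pv_equiv track=rewrite | github.com/flomotlik/awsquery | src/awsquery/auto_filters.py | _select_by_suffix_no_limit
-- ===== SOURCE A (Python) =====
-- from typing import Dict, List, Optional
--
-- def _get_base_name(field: str) -> str:
--     """Extract base field name from dotted path."""
--     return field.split(".")[-1]
--
-- def _get_path_depth(field: str) -> int:
--     """Return the nesting depth of a field (number of dots)."""
--     return field.count(".")
--
-- def _select_by_suffix_no_limit(
--     candidates: List[str], suffixes: List[str], already_selected: set
-- ) -> List[str]:
--     """Select all fields matching suffixes with priority ordering (no limit)."""
--     selected = []
--
--     for suffix in suffixes: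
--         for field in sorted(candidates, key=lambda f: (_get_path_depth(f), f)):
--             if field in already_selected or field in selected:
--                 continue
--             base = _get_base_name(field)
--             if base.endswith(suffix):
--                 selected.append(field)
--
--     return selected
-- ===== SOURCE B (Python) =====
-- def _get_base_name(field: str) -> str:
--     """Extract base field name from dotted path."""
--     return field.split(".")[-1]
--
--
-- def _get_path_depth(field: str) -> int:
--     """Return the nesting depth of a field (number of dots)."""
--     return field.count(".")
--
--
-- def _select_by_suffix_no_limit(candidates, suffixes, already_selected):
--     """Select all fields matching suffixes with priority ordering (no limit).
--
--     One pass over the candidates: each not-yet-seen field is assigned the index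
--     of the FIRST suffix its base name ends with (if any) and recorded as a
--     (suffix priority, depth, name) tuple; a single sort of that table then
--     yields the result.  No per-suffix re-sorting or rescanning.
--     """
--     seen = set(already_selected)
--     table = []
--     for field in candidates:
--         if field in seen:
--             continue
--         seen.add(field)
--         base = _get_base_name(field)
--         for i, suffix in enumerate(suffixes):
--             if base.endswith(suffix):
--                 table.append((i, _get_path_depth(field), field))
--                 break
--     table.sort()
--     return [field for _, _, field in table]
-- ===== Notes on version B (the rewrite author's own statement) =====
-- stated objective: faster
-- what changed: B makes one pass over the candidates assigning each unseen field the index of the first suffix its base name ends with, collecting (priority, depth, name) tuples, and obtains the result by a single sort of that table — replacing A's outer loop over suffixes that re-sorts all candidates and rescans them with membership tests against the growing output for every suffix.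
import Mathlib
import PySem

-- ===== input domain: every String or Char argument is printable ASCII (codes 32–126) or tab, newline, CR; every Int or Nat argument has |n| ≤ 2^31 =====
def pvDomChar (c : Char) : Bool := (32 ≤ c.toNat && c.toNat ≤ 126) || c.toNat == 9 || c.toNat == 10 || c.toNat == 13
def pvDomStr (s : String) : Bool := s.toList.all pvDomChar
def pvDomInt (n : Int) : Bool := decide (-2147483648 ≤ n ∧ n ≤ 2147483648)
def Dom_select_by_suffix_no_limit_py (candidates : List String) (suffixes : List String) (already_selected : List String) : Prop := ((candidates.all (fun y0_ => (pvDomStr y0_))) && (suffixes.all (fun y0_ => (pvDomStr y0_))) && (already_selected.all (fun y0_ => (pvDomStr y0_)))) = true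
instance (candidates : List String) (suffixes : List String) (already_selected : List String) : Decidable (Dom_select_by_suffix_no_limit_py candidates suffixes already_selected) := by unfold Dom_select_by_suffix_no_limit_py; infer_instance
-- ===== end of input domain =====

-- B replaces A's per-suffix re-sorting and rescanning by ONE pass over the candidates that assigns each
-- unseen field the index of the first matching suffix, collects (priority, depth, name) tuples, and sorts
-- that table once (objective: faster; the 'already_selected' set is only read, no argument is mutated).

-- ===== PORT A =====
-- _get_base_name: field.split(".")[-1]; the separator "." is non-empty so split? never returns none,
-- and the split list is never empty so the [-1] index never raises (defaults are unreachable).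
def pvBase (f : String) : String :=
  PySem.List.pyGetD ((PySem.Str.split? f ".").getD []) (-1) ""

-- _get_path_depth: field.count(".")
def pvDepth (f : String) : Int := (PySem.Str.count f "." : Int)

def select_by_suffix_no_limit_py (candidates : List String) (suffixes : List String) (already_selected : List String) : List String :=
  suffixes.foldl (fun selected suffix =>
    (PySem.List.sorted2 candidates pvDepth (fun f => f)).foldl (fun sel field =>
      if already_selected.contains field || sel.contains field then sel
      else if PySem.Str.endswith (pvBase field) suffix then sel ++ [field]
      else sel) selected) []

-- ===== PORT B =====
-- 'for i, suffix in enumerate(suffixes): if base.endswith(suffix): … break' — first matching index.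
def pvFirstMatch (base : String) (i : Int) : List String → Option Int
  | [] => none
  | s :: rest => if PySem.Str.endswith base s then some i else pvFirstMatch base (i + 1) rest

-- Python's tuple order on (int, int, str) triples, as the sort key of table.sort().
def pvKey3 (t : Int × Int × String) : Lex (Int × Lex (Int × String)) :=
  toLex (t.1, toLex (t.2.1, t.2.2))

def select_by_suffix_no_limit_py_alt (candidates : List String) (suffixes : List String) (already_selected : List String) : List String :=
  (PySem.List.sorted
    (candidates.foldl (fun (st : PySem.Set String × List (Int × Int × String)) field =>
      if PySem.Set.contains st.1 field then st
      else
        match pvFirstMatch (pvBase field) 0 suffixes with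
        | some i => (PySem.Set.add st.1 field, st.2 ++ [(i, pvDepth field, field)])
        | none => (PySem.Set.add st.1 field, st.2))
      (PySem.Set.ofList already_selected, ([] : List (Int × Int × String)))).2
    pvKey3).map (fun t => t.2.2)

-- ===== PRECONDITION & SPEC =====
def Spec_select_by_suffix_no_limit_py (candidates : List String) (suffixes : List String) (already_selected : List String) (out : List String) : Prop := out = select_by_suffix_no_limit_py_alt candidates suffixes already_selected
instance (candidates : List String) (suffixes : List String) (already_selected : List String) (out : List String) : Decidable (Spec_select_by_suffix_no_limit_py candidates suffixes already_selected out) := by unfold Spec_select_by_suffix_no_limit_py; infer_instance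

-- ===== CLAIM (what is proved, stated in full; the proofs are below) =====
def Claim_equal_select_by_suffix_no_limit_py : Prop := ∀ (candidates : List String) (suffixes : List String) (already_selected : List String), Dom_select_by_suffix_no_limit_py candidates suffixes already_selected → Spec_select_by_suffix_no_limit_py candidates suffixes already_selected (select_by_suffix_no_limit_py candidates suffixes already_selected)

-- ===== LEMMAS AND PROOFS =====

-- The sort key A uses on fields: the tuple (depth, field), compared lexicographically.
def pvKey (f : String) : Lex (Int × String) := toLex (pvDepth f, f)

lemma pvKey_inj {f g : String} (h : pvKey f = pvKey g) : f = g := by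
  have := congrArg (fun k => (ofLex k).2) h
  simpa [pvKey] using this

lemma pv_before_eq (a b : String) :
    (decide (pvDepth a < pvDepth b) || (!decide (pvDepth b < pvDepth a) && decide (a < b)))
      = decide (pvKey a < pvKey b) := by
  rcases lt_trichotomy (pvDepth a) (pvDepth b) with h | h | h
  · simp [pvKey, Prod.Lex.lt_iff, h, lt_asymm h]
  · simp [pvKey, Prod.Lex.lt_iff, h]
  · simp [pvKey, Prod.Lex.lt_iff, h, lt_asymm h, h.ne']

-- sorted(xs, key=lambda f: (depth(f), f)) is sorted(xs, key=pvKey) with the lexicographic key.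
lemma pv_sorted2_eq (xs : List String) :
    PySem.List.sorted2 xs pvDepth (fun f => f) = PySem.List.sorted xs pvKey := by
  rw [PySem.List.sorted_eq_foldl_insertBy]
  simp only [PySem.List.sorted2]
  congr 1
  funext acc x
  congr 1
  funext a b
  simpa using pv_before_eq a b

lemma pv_contains_false (l : List String) (a : String) : l.contains a = false ↔ a ∉ l := by
  simp

-- One pass of A's inner loop over a weakly key-sorted list L appends exactly the strictly
-- key-sorted list M of the unblocked fields of L whose base name ends with s.
lemma pv_pass (already : List String) (s : String) :
    ∀ (L acc M : List String),
      List.Pairwise (fun a b => pvKey a < pvKey b) M →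
      (∀ g ∈ M, g ∈ L ∧ already.contains g = false ∧ acc.contains g = false ∧
        PySem.Str.endswith (pvBase g) s = true) →
      (∀ g ∈ L, already.contains g = false → acc.contains g = false →
        PySem.Str.endswith (pvBase g) s = true → g ∈ M) →
      List.Pairwise (fun a b => pvKey a ≤ pvKey b) L →
      L.foldl (fun sel field =>
          if already.contains field || sel.contains field then sel
          else if PySem.Str.endswith (pvBase field) s then sel ++ [field]
          else sel) acc = acc ++ M := by
  intro L
  induction L with
  | nil =>
      intro acc M _ hMin _ _
      have : M = [] := by
        cases M with
        | nil => rfl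
        | cons m T => exact absurd (hMin m List.mem_cons_self).1 List.not_mem_nil
      simp [this]
  | cons f L' ih =>
      intro acc M hMp hMin hMax hLp
      have hle : ∀ g ∈ L', pvKey f ≤ pvKey g := (List.pairwise_cons.mp hLp).1
      have hLp' := (List.pairwise_cons.mp hLp).2
      by_cases hblk : (already.contains f || acc.contains f) = true
      · rw [List.foldl_cons, if_pos hblk]
        apply ih acc M hMp ?_ ?_ hLp'
        · intro g hg
          obtain ⟨hgL, hga, hgc, hge⟩ := hMin g hg
          refine ⟨?_, hga, hgc, hge⟩
          have hgf : g ≠ f := by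
            rintro rfl
            rcases (Bool.or_eq_true _ _).mp hblk with h | h
            · rw [hga] at h; cases h
            · rw [hgc] at h; cases h
          rcases List.mem_cons.mp hgL with h | h
          · exact absurd h hgf
          · exact h
        · intro g hg hga hgc hge
          exact hMax g (List.mem_cons_of_mem f hg) hga hgc hge
      · have hor := Bool.or_eq_false_iff.mp (Bool.of_not_eq_true hblk)
        have hfa : already.contains f = false := hor.1
        have hfc : acc.contains f = false := hor.2
        by_cases hend : PySem.Str.endswith (pvBase f) s = true
        · -- f is appended; it is the head of M
          rw [List.foldl_cons, if_neg hblk, if_pos hend]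
          have hfM : f ∈ M := hMax f List.mem_cons_self hfa hfc hend
          have hmin : ∀ g ∈ M, g ≠ f → pvKey f < pvKey g := by
            intro g hg hgf
            obtain ⟨hgL, _, _, _⟩ := hMin g hg
            have hgL' : g ∈ L' := by
              rcases List.mem_cons.mp hgL with h | h
              · exact absurd h hgf
              · exact h
            exact lt_of_le_of_ne (hle g hgL') (fun h => hgf (pvKey_inj h).symm)
          obtain ⟨T, hMT⟩ : ∃ T, M = f :: T := by
            cases M with
            | nil => exact absurd hfM List.not_mem_nil
            | cons m T =>
                by_cases hmf : m = f
                · exact ⟨T, by rw [hmf]⟩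
                · have hfT : f ∈ T := by
                    rcases List.mem_cons.mp hfM with h | h
                    · exact absurd h.symm hmf
                    · exact h
                  have h1 : pvKey m < pvKey f := (List.pairwise_cons.mp hMp).1 f hfT
                  have h2 : pvKey f < pvKey m := hmin m List.mem_cons_self hmf
                  exact absurd h1 (lt_asymm h2)
          subst hMT
          have hMp' := (List.pairwise_cons.mp hMp).2
          have hfT : ∀ g ∈ T, g ≠ f := by
            intro g hg h
            subst h
            exact lt_irrefl _ ((List.pairwise_cons.mp hMp).1 g hg)
          have h1 : ∀ g ∈ T, g ∈ L' ∧ already.contains g = false ∧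
              (acc ++ [f]).contains g = false ∧ PySem.Str.endswith (pvBase g) s = true := by
            intro g hg
            obtain ⟨hgL, hga, hgc, hge⟩ := hMin g (List.mem_cons_of_mem f hg)
            have hgf := hfT g hg
            refine ⟨?_, hga, ?_, hge⟩
            · rcases List.mem_cons.mp hgL with h | h
              · exact absurd h hgf
              · exact h
            · rw [pv_contains_false] at hgc ⊢
              simp [List.mem_append, hgc, hgf]
          have h2 : ∀ g ∈ L', already.contains g = false → (acc ++ [f]).contains g = false →
              PySem.Str.endswith (pvBase g) s = true → g ∈ T := by
            intro g hg hga hgc hge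
            rw [pv_contains_false, List.mem_append] at hgc
            push Not at hgc
            have hgf : g ≠ f := by simpa using hgc.2
            have : g ∈ f :: T :=
              hMax g (List.mem_cons_of_mem f hg) hga (by rw [pv_contains_false]; exact hgc.1) hge
            rcases List.mem_cons.mp this with h | h
            · exact absurd h hgf
            · exact h
          rw [ih (acc ++ [f]) T hMp' h1 h2 hLp', List.append_assoc]
          rfl
        · -- f does not match this suffix: nothing appended, M unchanged
          rw [List.foldl_cons, if_neg hblk, if_neg hend]
          apply ih acc M hMp ?_ ?_ hLp'
          · intro g hg
            obtain ⟨hgL, hga, hgc, hge⟩ := hMin g hg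
            have hgf : g ≠ f := by rintro rfl; exact hend hge
            refine ⟨?_, hga, hgc, hge⟩
            rcases List.mem_cons.mp hgL with h | h
            · exact absurd h hgf
            · exact h
          · intro g hg hga hgc hge
            exact hMax g (List.mem_cons_of_mem f hg) hga hgc hge

-- A's result, restated over the strictly sorted remaining list R: per suffix, take the fields of R
-- whose base name ends with it and recurse on the rest.
def pvSel : List String → List String → List String
  | [], _ => []
  | s :: rest, R =>
      R.filter (fun f => PySem.Str.endswith (pvBase f) s)
        ++ pvSel rest (R.filter (fun f => !PySem.Str.endswith (pvBase f) s))

-- The main invariant on A: its remaining suffix passes starting from output acc compute acc ++ pvSel,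
-- whenever R is the strictly key-sorted list of exactly the candidates neither already selected nor in acc.
lemma pv_main (candidates already : List String) :
    ∀ (sufs acc R : List String),
      List.Pairwise (fun a b => pvKey a < pvKey b) R →
      (∀ f, f ∈ R ↔ f ∈ candidates ∧ already.contains f = false ∧ acc.contains f = false) →
      sufs.foldl (fun selected suffix =>
          (PySem.List.sorted2 candidates pvDepth (fun f => f)).foldl (fun sel field =>
            if already.contains field || sel.contains field then sel
            else if PySem.Str.endswith (pvBase field) suffix then sel ++ [field]
            else sel) selected) acc
        = acc ++ pvSel sufs R := by
  intro sufs
  induction sufs with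
  | nil => intro acc R _ _; simp [pvSel]
  | cons s rest ih =>
      intro acc R hRp hR
      simp only [List.foldl_cons]
      have hmemS : ∀ g, g ∈ PySem.List.sorted2 candidates pvDepth (fun f => f) ↔ g ∈ candidates :=
        fun g => (PySem.List.sorted2_perm candidates pvDepth (fun f => f) false).mem_iff
      have hMp : List.Pairwise (fun a b => pvKey a < pvKey b)
          (R.filter (fun f => PySem.Str.endswith (pvBase f) s)) := hRp.filter _
      have hMin : ∀ g ∈ R.filter (fun f => PySem.Str.endswith (pvBase f) s),
          g ∈ PySem.List.sorted2 candidates pvDepth (fun f => f) ∧ already.contains g = false ∧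
            acc.contains g = false ∧ PySem.Str.endswith (pvBase g) s = true := by
        intro g hg
        obtain ⟨hgR, hge⟩ := List.mem_filter.mp hg
        obtain ⟨hgc, hga, hgacc⟩ := (hR g).mp hgR
        exact ⟨(hmemS g).mpr hgc, hga, hgacc, hge⟩
      have hMax : ∀ g ∈ PySem.List.sorted2 candidates pvDepth (fun f => f),
          already.contains g = false → acc.contains g = false →
          PySem.Str.endswith (pvBase g) s = true →
          g ∈ R.filter (fun f => PySem.Str.endswith (pvBase f) s) := by
        intro g hg hga hgacc hge
        exact List.mem_filter.mpr ⟨(hR g).mpr ⟨(hmemS g).mp hg, hga, hgacc⟩, hge⟩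
      have hLp : List.Pairwise (fun a b => pvKey a ≤ pvKey b)
          (PySem.List.sorted2 candidates pvDepth (fun f => f)) := by
        rw [pv_sorted2_eq]
        exact PySem.List.sorted_pairwise candidates pvKey
      rw [pv_pass already s (PySem.List.sorted2 candidates pvDepth (fun f => f)) acc
        (R.filter (fun f => PySem.Str.endswith (pvBase f) s)) hMp hMin hMax hLp]
      rw [show pvSel (s :: rest) R = R.filter (fun f => PySem.Str.endswith (pvBase f) s)
        ++ pvSel rest (R.filter (fun f => !PySem.Str.endswith (pvBase f) s)) from rfl]
      rw [← List.append_assoc]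
      apply ih
      · exact hRp.filter _
      · intro f
        rw [List.mem_filter]
        constructor
        · rintro ⟨hfR, hfe⟩
          obtain ⟨hfc, hfa, hfacc⟩ := (hR f).mp hfR
          refine ⟨hfc, hfa, ?_⟩
          rw [pv_contains_false, List.mem_append]
          push Not
          refine ⟨by rw [← pv_contains_false]; exact hfacc, ?_⟩
          intro hmem
          have := (List.mem_filter.mp hmem).2
          simp at this hfe
          simp [hfe] at this
        · rintro ⟨hfc, hfa, hfacc⟩
          rw [pv_contains_false, List.mem_append] at hfacc
          push Not at hfacc
          have hfR : f ∈ R := (hR f).mpr ⟨hfc, hfa, by rw [pv_contains_false]; exact hfacc.1⟩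
          refine ⟨hfR, ?_⟩
          cases hh : PySem.Str.endswith (pvBase f) s
          · rfl
          · exact absurd (List.mem_filter.mpr ⟨hfR, hh⟩) hfacc.2

-- ===== B-side lemmas =====

lemma pvFirstMatch_cons (base s : String) (rest : List String) (i : Int) :
    pvFirstMatch base i (s :: rest)
      = if PySem.Str.endswith base s then some i else pvFirstMatch base (i + 1) rest := rfl

-- Starting the first-match scan at i shifts every result by i.
lemma pvFirstMatch_shift (base : String) (l : List String) :
    ∀ i : Int, pvFirstMatch base i l = (pvFirstMatch base 0 l).map (· + i) := by
  induction l with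
  | nil => intro i; rfl
  | cons s rest ih =>
      intro i
      rw [pvFirstMatch_cons, pvFirstMatch_cons]
      by_cases h : PySem.Str.endswith base s = true
      · rw [if_pos h, if_pos h]; simp
      · rw [if_neg h, if_neg h, ih (i + 1), ih (0 + 1)]
        cases pvFirstMatch base 0 rest with
        | none => rfl
        | some j => simp; omega

lemma pvFirstMatch_nonneg (base : String) :
    ∀ (l : List String) (j : Int), pvFirstMatch base 0 l = some j → 0 ≤ j := by
  intro l
  induction l with
  | nil => intro j h; cases h
  | cons s rest ih =>
      intro j h
      rw [pvFirstMatch_cons] at h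
      by_cases he : PySem.Str.endswith base s = true
      · rw [if_pos he] at h; injection h with h; omega
      · rw [if_neg he, pvFirstMatch_shift] at h
        cases hr : pvFirstMatch base 0 rest with
        | none => rw [hr] at h; cases h
        | some k =>
            rw [hr] at h
            simp at h
            have := ih k hr
            omega

lemma pvMat_cons (b s : String) (rest : List String) :
    (pvFirstMatch b 0 (s :: rest)).isSome
      = (PySem.Str.endswith b s || (pvFirstMatch b 0 rest).isSome) := by
  rw [pvFirstMatch_cons]
  by_cases h : PySem.Str.endswith b s = true
  · rw [if_pos h, h]; simp
  · have h' : PySem.Str.endswith b s = false := Bool.eq_false_iff.mpr h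
    rw [if_neg h, h', pvFirstMatch_shift]
    cases pvFirstMatch b 0 rest <;> simp

-- Filtering a disjunction is, up to permutation, filtering each disjunct in turn.
lemma pv_filter_or_perm {α : Type} (p q : α → Bool) :
    ∀ l : List α, (l.filter (fun x => p x || q x)).Perm
      (l.filter p ++ (l.filter (fun x => !p x)).filter q) := by
  intro l
  induction l with
  | nil => simp
  | cons x l ih =>
      by_cases hp : p x = true
      · simpa [List.filter_cons, hp] using ih.cons x
      · have hp' : p x = false := by simp [hp]
        by_cases hq : q x = true
        · simp only [List.filter_cons, hp', hq, Bool.not_false, Bool.false_or, if_pos]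
          exact (ih.cons x).trans (List.perm_middle).symm
        · have hq' : q x = false := by simp [hq]
          simpa [List.filter_cons, hp', hq'] using ih

-- pvSel is a permutation of the matched fields.
lemma pvSel_perm (sufs : List String) :
    ∀ R : List String, (pvSel sufs R).Perm
      (R.filter (fun f => (pvFirstMatch (pvBase f) 0 sufs).isSome)) := by
  induction sufs with
  | nil => intro R; simp [pvSel, pvFirstMatch]
  | cons s rest ih =>
      intro R
      have h1 := (ih (R.filter (fun f => !PySem.Str.endswith (pvBase f) s))).append_left
        (R.filter (fun f => PySem.Str.endswith (pvBase f) s))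
      refine (h1.trans ?_)
      have h2 := pv_filter_or_perm (fun f => PySem.Str.endswith (pvBase f) s)
        (fun f => (pvFirstMatch (pvBase f) 0 rest).isSome) R
      refine (h2.symm.trans ?_)
      apply List.Perm.of_eq
      apply List.filter_congr
      intro f _
      exact (pvMat_cons (pvBase f) s rest).symm

-- The (priority, depth, name) triple B records for a matched field.
def pvTrip (sufs : List String) (f : String) : Int × Int × String :=
  ((pvFirstMatch (pvBase f) 0 sufs).getD 0, pvDepth f, f)

lemma pvKey3_lt_iff (a b : Int × Int × String) :
    pvKey3 a < pvKey3 b ↔ a.1 < b.1 ∨ (a.1 = b.1 ∧ (a.2.1 < b.2.1 ∨ (a.2.1 = b.2.1 ∧ a.2.2 < b.2.2))) := by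
  simp [pvKey3, Prod.Lex.lt_iff]

lemma pvKey_lt_iff (a b : String) :
    pvKey a < pvKey b ↔ pvDepth a < pvDepth b ∨ (pvDepth a = pvDepth b ∧ a < b) := by
  simp [pvKey, Prod.Lex.lt_iff]

-- pvSel of a strictly key-sorted list is strictly sorted under the triple key.
lemma pvSel_sorted (sufs : List String) :
    ∀ R : List String, List.Pairwise (fun a b => pvKey a < pvKey b) R →
      List.Pairwise (fun a b => pvKey3 (pvTrip sufs a) < pvKey3 (pvTrip sufs b)) (pvSel sufs R) := by
  induction sufs with
  | nil => intro R _; simp [pvSel]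
  | cons s rest ih =>
      intro R hR
      rw [show pvSel (s :: rest) R = R.filter (fun f => PySem.Str.endswith (pvBase f) s)
        ++ pvSel rest (R.filter (fun f => !PySem.Str.endswith (pvBase f) s)) from rfl]
      rw [List.pairwise_append]
      have hmem2 : ∀ f ∈ pvSel rest (R.filter (fun f => !PySem.Str.endswith (pvBase f) s)),
          PySem.Str.endswith (pvBase f) s = false ∧ (pvFirstMatch (pvBase f) 0 rest).isSome := by
        intro f hf
        have := (pvSel_perm rest _).mem_iff.mp hf
        obtain ⟨hfR, hfm⟩ := List.mem_filter.mp this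
        have := (List.mem_filter.mp hfR).2
        exact ⟨by simpa using this, by simpa using hfm⟩
      have htrip1 : ∀ f, PySem.Str.endswith (pvBase f) s = true →
          pvTrip (s :: rest) f = (0, pvDepth f, f) := by
        intro f hf
        simp only [pvTrip]
        rw [pvFirstMatch_cons, if_pos hf]
        rfl
      have htrip2 : ∀ f, PySem.Str.endswith (pvBase f) s = false →
          pvTrip (s :: rest) f = ((pvFirstMatch (pvBase f) 0 rest).getD (-1) + 1, pvDepth f, f) := by
        intro f hf
        simp only [pvTrip]
        rw [pvFirstMatch_cons, if_neg (by rw [hf]; exact Bool.false_ne_true), pvFirstMatch_shift]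
        cases pvFirstMatch (pvBase f) 0 rest <;> simp
      refine ⟨?_, ?_, ?_⟩
      · -- first block: all priorities 0, strictly sorted by pvKey
        refine (hR.filter _).imp_of_mem ?_
        intro a b ha hb hab
        have hea := (List.mem_filter.mp ha).2
        have heb := (List.mem_filter.mp hb).2
        rw [htrip1 a hea, htrip1 b heb, pvKey3_lt_iff]
        rw [pvKey_lt_iff] at hab
        exact Or.inr ⟨rfl, hab⟩
      · -- second block: shift preserves strict order
        refine (ih _ ((hR.filter _))).imp_of_mem ?_
        intro a b ha hb hab
        obtain ⟨hea, hma⟩ := hmem2 a ha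
        obtain ⟨heb, hmb⟩ := hmem2 b hb
        rw [htrip2 a hea, htrip2 b heb, pvKey3_lt_iff]
        obtain ⟨ja, hja⟩ := Option.isSome_iff_exists.mp hma
        obtain ⟨jb, hjb⟩ := Option.isSome_iff_exists.mp hmb
        rw [pvKey3_lt_iff] at hab
        simp only [pvTrip, hja, hjb, Option.getD_some] at hab ⊢
        rcases hab with h | h
        · exact Or.inl (by omega)
        · exact Or.inr ⟨by omega, h.2⟩
      · -- across blocks: priority 0 < priority j + 1
        intro a ha b hb
        have hea := (List.mem_filter.mp ha).2
        obtain ⟨heb, hmb⟩ := hmem2 b hb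
        obtain ⟨jb, hjb⟩ := Option.isSome_iff_exists.mp hmb
        have hjb0 := pvFirstMatch_nonneg (pvBase b) rest jb hjb
        rw [htrip1 a hea, htrip2 b heb, pvKey3_lt_iff]
        simp only [hjb, Option.getD_some]
        exact Or.inl (by omega)

-- The distinct candidates not yet seen, in candidate order: exactly the fields B processes.
def pvNew (S : List String) : List String → List String
  | [] => []
  | c :: cs => if c ∈ S then pvNew S cs else c :: pvNew (S ++ [c]) cs

lemma mem_pvNew (f : String) : ∀ (cs S : List String), f ∈ pvNew S cs ↔ f ∈ cs ∧ f ∉ S := by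
  intro cs
  induction cs with
  | nil => intro S; simp [pvNew]
  | cons c cs ih =>
      intro S
      by_cases hc : c ∈ S
      · rw [show pvNew S (c :: cs) = pvNew S cs from if_pos hc, ih]
        constructor
        · rintro ⟨h1, h2⟩; exact ⟨List.mem_cons_of_mem c h1, h2⟩
        · rintro ⟨h1, h2⟩
          rcases List.mem_cons.mp h1 with h | h
          · exact absurd (h ▸ hc) h2
          · exact ⟨h, h2⟩
      · rw [show pvNew S (c :: cs) = c :: pvNew (S ++ [c]) cs from if_neg hc]
        rw [List.mem_cons, ih]
        constructor
        · rintro (rfl | ⟨h1, h2⟩)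
          · exact ⟨List.mem_cons_self, hc⟩
          · exact ⟨List.mem_cons_of_mem c h1, fun h => h2 (List.mem_append_left _ h)⟩
        · rintro ⟨h1, h2⟩
          rcases List.mem_cons.mp h1 with h | h
          · exact Or.inl h
          · by_cases hfc : f = c
            · exact Or.inl hfc
            · exact Or.inr ⟨h, by simp [h2, hfc]⟩

lemma nodup_pvNew : ∀ (cs S : List String), (pvNew S cs).Nodup := by
  intro cs
  induction cs with
  | nil => intro S; simp [pvNew]
  | cons c cs ih =>
      intro S
      by_cases hc : c ∈ S
      · rw [show pvNew S (c :: cs) = pvNew S cs from if_pos hc]; exact ih S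
      · rw [show pvNew S (c :: cs) = c :: pvNew (S ++ [c]) cs from if_neg hc]
        refine List.nodup_cons.mpr ⟨?_, ih (S ++ [c])⟩
        rw [mem_pvNew]
        rintro ⟨_, h⟩
        exact h (List.mem_append_right _ List.mem_cons_self)

-- B's candidate pass builds exactly the triples of the matched new fields, in candidate order.
lemma pv_foldB (suffixes : List String) :
    ∀ (cs : List String) (S : PySem.Set String) (tbl : List (Int × Int × String)),
      (cs.foldl (fun (st : PySem.Set String × List (Int × Int × String)) field =>
        if PySem.Set.contains st.1 field then st
        else
          match pvFirstMatch (pvBase field) 0 suffixes with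
          | some i => (PySem.Set.add st.1 field, st.2 ++ [(i, pvDepth field, field)])
          | none => (PySem.Set.add st.1 field, st.2)) (S, tbl)).2
      = tbl ++ ((pvNew S cs).filter
          (fun f => (pvFirstMatch (pvBase f) 0 suffixes).isSome)).map (pvTrip suffixes) := by
  intro cs
  induction cs with
  | nil => intro S tbl; simp [pvNew]
  | cons c cs ih =>
      intro S tbl
      rw [List.foldl_cons]
      by_cases hc : c ∈ S
      · have hcS : PySem.Set.contains S c = true := by simpa using hc
        rw [if_pos hcS, show pvNew S (c :: cs) = pvNew S cs from if_pos hc]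
        exact ih S tbl
      · have hcS : ¬ PySem.Set.contains S c = true := by
          intro h; exact hc (by simpa using h)
        rw [if_neg hcS, show pvNew S (c :: cs) = c :: pvNew (S ++ [c]) cs from if_neg hc]
        have hadd : PySem.Set.add S c = S ++ [c] := PySem.Set.add_of_not_mem hc
        cases hm : pvFirstMatch (pvBase c) 0 suffixes with
        | some i =>
            rw [ih (PySem.Set.add S c) (tbl ++ [(i, pvDepth c, c)]), hadd]
            simp [hm, pvTrip]
        | none =>
            rw [ih (PySem.Set.add S c) tbl, hadd]
            simp [hm]

-- ===== VERDICT (by name: the statement is the Claim_ definition above) =====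
theorem select_by_suffix_no_limit_py_spec : Claim_equal_select_by_suffix_no_limit_py := by
  intro candidates suffixes already_selected _
  unfold Spec_select_by_suffix_no_limit_py
  unfold select_by_suffix_no_limit_py select_by_suffix_no_limit_py_alt
  -- the strictly key-sorted list of candidates not already selected
  set R0 := PySem.List.sorted (PySem.Set.diff (PySem.Set.ofList candidates) already_selected)
    pvKey with hR0
  have hperm : R0.Perm (PySem.Set.diff (PySem.Set.ofList candidates) already_selected) :=
    PySem.List.sorted_perm _ pvKey false
  have hnd : R0.Nodup := hperm.nodup_iff.mpr
    (PySem.Set.nodup_diff (PySem.Set.ofList candidates) already_selected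
      (PySem.Set.nodup_ofList candidates))
  have hwp : List.Pairwise (fun a b => pvKey a ≤ pvKey b) R0 :=
    PySem.List.sorted_pairwise _ pvKey
  have hsp : List.Pairwise (fun a b => pvKey a < pvKey b) R0 :=
    (hwp.and hnd).imp (fun h => lt_of_le_of_ne h.1 (fun he => h.2 (pvKey_inj he)))
  -- A's side: the nested folds compute pvSel suffixes R0
  have hA : (suffixes.foldl (fun selected suffix =>
      (PySem.List.sorted2 candidates pvDepth (fun f => f)).foldl (fun sel field =>
        if already_selected.contains field || sel.contains field then sel
        else if PySem.Str.endswith (pvBase field) suffix then sel ++ [field]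
        else sel) selected) []) = pvSel suffixes R0 := by
    have := pv_main candidates already_selected suffixes [] R0 hsp ?_
    · simpa using this
    · intro f
      rw [hperm.mem_iff, PySem.Set.mem_diff, PySem.Set.mem_ofList]
      simp
  rw [hA]
  -- B's side: the table is the triples of the matched new fields
  rw [pv_foldB suffixes candidates (PySem.Set.ofList already_selected) []]
  simp only [List.nil_append]
  -- the sorted table is exactly the triples of pvSel suffixes R0
  have hsort : PySem.List.sorted (((pvNew (PySem.Set.ofList already_selected) candidates).filter
        (fun f => (pvFirstMatch (pvBase f) 0 suffixes).isSome)).map (pvTrip suffixes)) pvKey3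
      = (pvSel suffixes R0).map (pvTrip suffixes) := by
    apply PySem.List.sorted_eq_of_perm_of_pairwise_lt
    · -- permutation: both are the matched distinct not-already-selected candidates
      apply List.Perm.map
      have hperm2 : R0.Perm (pvNew (PySem.Set.ofList already_selected) candidates) := by
        apply (List.perm_ext_iff_of_nodup hnd (nodup_pvNew _ _)).mpr
        intro f
        rw [hperm.mem_iff, PySem.Set.mem_diff, PySem.Set.mem_ofList, mem_pvNew,
          PySem.Set.mem_ofList]
      exact (pvSel_perm suffixes R0).trans (hperm2.filter _)
    · exact List.pairwise_map.mpr (pvSel_sorted suffixes R0 hsp)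
  rw [hsort, List.map_map]
  have : ((fun t : Int × Int × String => t.2.2) ∘ pvTrip suffixes) = id := by
    funext f; rfl
  rw [this, List.map_id]
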